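-- pv_equiv track=rewrite | github.com/population-interventions/PythonGlue | PMSLT_output/source/include/utilities.py | PickNthElementFromSpace
-- ===== SOURCE A (Python) =====
-- def ListReverse(myList):
-- 	myCopy = list(myList).copy()
-- 	myCopy.reverse()
-- 	return myCopy
--
-- def PickNthElementFromSpace(dimensions, n):
-- 	# Selects the nth (zero indexed) element of a list of lists, where
-- 	# the lists define a lexicographic ordering of all the points in
-- 	# the multidimensional space defined by taking each of the inner
-- 	# lists as a dimension.
-- 	point = []
-- 	for dim in ListReverse(dimensions):
-- 		options = len(dim)
-- 		pick = n % (options)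
-- 		n = int((n - pick) / options)
-- 		point.append(dim[pick])
-- 	return ListReverse(point)
-- ===== SOURCE B (Python) =====
-- def PickNthElementFromSpace(dimensions, n):
-- 	# Recursive decomposition: the size of the space spanned by the remaining
-- 	# dimensions gives the stride of the first coordinate; pick it directly,
-- 	# then recurse on the tail with the remainder.
-- 	if not dimensions:
-- 		return []
-- 	head, rest = dimensions[0], dimensions[1:]
-- 	m = 1
-- 	for d in rest:
-- 		m *= len(d)
-- 	return [head[(n // m) % len(head)]] + PickNthElementFromSpace(rest, n % m)
-- ===== Notes on version B (the rewrite author's own statement) =====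
-- stated objective: alternative
-- what changed: B is recursive on the list of dimensions: it computes the size of the space spanned by the remaining dimensions, picks the first coordinate directly with (n // size) % len, and recurses on the tail with n % size, instead of A's iterative least-significant-first reduction of n over the reversed list followed by reversing the accumulated point.
import Mathlib
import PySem

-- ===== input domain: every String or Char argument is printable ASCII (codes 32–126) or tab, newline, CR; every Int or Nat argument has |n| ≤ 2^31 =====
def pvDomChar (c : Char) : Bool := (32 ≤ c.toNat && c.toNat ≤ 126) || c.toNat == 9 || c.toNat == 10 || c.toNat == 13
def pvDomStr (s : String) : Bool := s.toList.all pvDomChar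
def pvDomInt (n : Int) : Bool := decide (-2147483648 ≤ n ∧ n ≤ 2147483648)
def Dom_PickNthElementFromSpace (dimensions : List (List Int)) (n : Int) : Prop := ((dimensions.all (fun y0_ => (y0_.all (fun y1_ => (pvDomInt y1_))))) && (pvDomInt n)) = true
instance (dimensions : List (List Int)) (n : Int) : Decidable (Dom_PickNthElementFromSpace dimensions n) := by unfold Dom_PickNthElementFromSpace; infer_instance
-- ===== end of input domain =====

-- B replaces A's iterative reduce-n-over-the-reversed-list-then-reverse scheme by a
-- recursion on the dimensions that picks each coordinate by the size of the remaining
-- space (alternative decomposition, same output).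

-- ===== PORT A =====
def ListReverse {α : Type} (myList : List α) : List α := myList.reverse

-- A's loop body: pick = n % len(dim); n = int((n - pick) / options); point.append(dim[pick]).
-- int((n - pick) / options): the float division is exact here (options divides n - pick,
-- and |n| ≤ 2^31 on Dom), so it is ported as floor division.
def stepA (st : List Int × Int) (dim : List Int) : List Int × Int :=
  (st.1 ++ [(PySem.List.pyGet? dim (PySem.Int.mod st.2 dim.length)).getD 0],
   PySem.Int.floordiv (st.2 - PySem.Int.mod st.2 dim.length) dim.length)

def PickNthElementFromSpace (dimensions : List (List Int)) (n : Int) : List Int :=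
  ListReverse ((ListReverse dimensions).foldl stepA ([], n)).1

-- ===== PORT B =====
-- B's inner loop: m = 1; for d in rest: m *= len(d)
def spaceSize (rest : List (List Int)) : Int :=
  rest.foldl (fun m d => m * d.length) 1

-- B's recursion: first coordinate via the size of the remaining space, then recurse.
def PickNthElementFromSpace_alt : List (List Int) → Int → List Int
  | [], _ => []
  | head :: rest, n =>
    let m := spaceSize rest
    (PySem.List.pyGet? head (PySem.Int.mod (PySem.Int.floordiv n m) head.length)).getD 0
      :: PickNthElementFromSpace_alt rest (PySem.Int.mod n m)

-- ===== PRECONDITION & SPEC =====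
-- Pre_ excludes an empty inner dimension: there Python A raises ZeroDivisionError (n % 0).
def Pre_PickNthElementFromSpace (dimensions : List (List Int)) (_n : Int) : Prop :=
  ∀ d ∈ dimensions, d ≠ []
instance (dimensions : List (List Int)) (n : Int) : Decidable (Pre_PickNthElementFromSpace dimensions n) := by unfold Pre_PickNthElementFromSpace; infer_instance
def pvWitness_PickNthElementFromSpace : List (List Int) × Int := ([[7, 8], [1, 2, 3]], 4)

def Spec_PickNthElementFromSpace (dimensions : List (List Int)) (n : Int) (out : List Int) : Prop := out = PickNthElementFromSpace_alt dimensions n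
instance (dimensions : List (List Int)) (n : Int) (out : List Int) : Decidable (Spec_PickNthElementFromSpace dimensions n out) := by unfold Spec_PickNthElementFromSpace; infer_instance

-- ===== CLAIM (what is proved, stated in full; the proofs are below) =====
def Claim_equal_PickNthElementFromSpace : Prop := ∀ (dimensions : List (List Int)) (n : Int), Dom_PickNthElementFromSpace dimensions n → Pre_PickNthElementFromSpace dimensions n → Spec_PickNthElementFromSpace dimensions n (PickNthElementFromSpace dimensions n)

-- ===== LEMMAS AND PROOFS =====

lemma foldA_prefix (l : List (List Int)) : ∀ (p : List Int) (n : Int),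
    l.foldl stepA (p, n) = (p ++ (l.foldl stepA ([], n)).1, (l.foldl stepA ([], n)).2) := by
  induction l with
  | nil => intro p n; simp
  | cons d l ih =>
      intro p n
      simp only [List.foldl_cons, stepA]
      rw [ih, ih (([] : List Int) ++ _)]
      simp

-- unfolded (snoc) form of port A
lemma A_snoc (ds : List (List Int)) (d : List Int) (n : Int) :
    PickNthElementFromSpace (ds ++ [d]) n =
      PickNthElementFromSpace ds
        (PySem.Int.floordiv (n - PySem.Int.mod n d.length) d.length)
      ++ [(PySem.List.pyGet? d (PySem.Int.mod n d.length)).getD 0] := by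
  show (((ds ++ [d]).reverse.foldl stepA ([], n)).1).reverse = _
  rw [List.reverse_append]
  simp only [List.reverse_singleton, List.singleton_append, List.foldl_cons]
  have h : stepA ([], n) d =
      (([] : List Int) ++ [(PySem.List.pyGet? d (PySem.Int.mod n d.length)).getD 0],
       PySem.Int.floordiv (n - PySem.Int.mod n d.length) d.length) := by
    simp [stepA]
  rw [h, List.nil_append, foldA_prefix]
  show ((_ ++ _ : List Int)).reverse = _
  rw [List.reverse_append]
  rfl

lemma spaceSize_acc (l : List (List Int)) : ∀ a : Int,
    l.foldl (fun m d => m * (d.length : Int)) a = a * spaceSize l := by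
  induction l with
  | nil => intro a; simp [spaceSize]
  | cons d l ih =>
      intro a
      have h : spaceSize (d :: l) = (1 * (d.length : Int)) * spaceSize l := by
        unfold spaceSize; rw [List.foldl_cons, ih]; rfl
      rw [List.foldl_cons, ih, h]
      ring

lemma spaceSize_snoc (l : List (List Int)) (d : List Int) :
    spaceSize (l ++ [d]) = spaceSize l * d.length := by
  unfold spaceSize
  rw [List.foldl_append]
  rfl

lemma spaceSize_pos (l : List (List Int)) (h : ∀ d ∈ l, d ≠ []) : 0 < spaceSize l := by
  induction l with
  | nil => simp [spaceSize]
  | cons d l ih =>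
      have hd : (0 : Int) < d.length := by
        have := h d (by simp)
        have h2 : d.length ≠ 0 := by simpa [List.length_eq_zero_iff] using this
        omega
      have := ih (fun e he => h e (by simp [he]))
      simp only [spaceSize, List.foldl_cons, one_mul] at *
      rw [spaceSize_acc]
      positivity

-- floor-division facts used to realign the two digit extractions
lemma floordiv_floordiv (n a b : Int) (ha : 0 < a) (hb : 0 < b) :
    PySem.Int.floordiv (PySem.Int.floordiv n a) b = PySem.Int.floordiv n (a * b) := by
  rw [PySem.Int.floordiv_eq_ediv_of_pos ha, PySem.Int.floordiv_eq_ediv_of_pos hb,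
      PySem.Int.floordiv_eq_ediv_of_pos (by positivity)]
  exact Int.ediv_ediv_of_nonneg (le_of_lt ha)

lemma sub_mod_div (n L : Int) (hL : 0 < L) :
    PySem.Int.floordiv (n - PySem.Int.mod n L) L = PySem.Int.floordiv n L := by
  have h := PySem.Int.floordiv_mul_add_mod n L
  have h2 : n - PySem.Int.mod n L = PySem.Int.floordiv n L * L := by omega
  rw [h2, PySem.Int.floordiv_eq_ediv_of_pos hL, Int.mul_ediv_cancel _ (by omega)]

lemma mod_mul_mod (n b m : Int) (hb : 0 < b) (hm : 0 < m) :
    PySem.Int.mod (PySem.Int.mod n (m * b)) b = PySem.Int.mod n b := by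
  rw [PySem.Int.mod_eq_emod_of_pos hb, PySem.Int.mod_eq_emod_of_pos hb,
      PySem.Int.mod_eq_emod_of_pos (show (0:Int) < m * b by positivity)]
  exact Int.emod_emod_of_dvd n ⟨m, by ring⟩

lemma mod_mul_div (n b m : Int) (hb : 0 < b) (hm : 0 < m) :
    PySem.Int.floordiv (PySem.Int.mod n (m * b)) b = PySem.Int.mod (PySem.Int.floordiv n b) m := by
  rw [PySem.Int.mod_eq_emod_of_pos (by positivity), PySem.Int.floordiv_eq_ediv_of_pos hb,
      PySem.Int.floordiv_eq_ediv_of_pos hb, PySem.Int.mod_eq_emod_of_pos hm]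
  have h1 : n % (m * b) = n - m * b * (n / (m * b)) := by
    have := Int.emod_add_mul_ediv n (m * b); omega
  rw [h1]
  have h2 : n - m * b * (n / (m * b)) = n + b * (-(m * (n / (m * b)))) := by ring
  rw [h2, Int.add_mul_ediv_left _ _ (by omega : b ≠ 0)]
  have h3 : n / b + -(m * (n / (m * b))) = n / b - m * (n / (m * b)) := by ring
  rw [h3]
  have h4 : n / (m * b) = n / b / m := by
    rw [mul_comm]; exact (Int.ediv_ediv_of_nonneg (le_of_lt hb)).symm
  rw [h4]
  have := Int.emod_add_mul_ediv (n / b) m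
  omega

-- snoc form of port B
lemma B_snoc (d : List Int) (hd : d ≠ []) : ∀ (ds : List (List Int)),
    (∀ e ∈ ds, e ≠ []) → ∀ n : Int,
    PickNthElementFromSpace_alt (ds ++ [d]) n =
      PickNthElementFromSpace_alt ds (PySem.Int.floordiv n d.length)
      ++ [(PySem.List.pyGet? d (PySem.Int.mod n d.length)).getD 0] := by
  have hL : 0 < (d.length : Int) := by
    have h2 : d.length ≠ 0 := by simpa [List.length_eq_zero_iff] using hd
    omega
  intro ds
  induction ds with
  | nil =>
      intro _ n
      simp only [List.nil_append, PickNthElementFromSpace_alt]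
      have hm : spaceSize [] = 1 := rfl
      rw [hm]
      have h1 : PySem.Int.floordiv n 1 = n := by
        rw [PySem.Int.floordiv_eq_ediv_of_pos one_pos, Int.ediv_one]
      simp only [h1]
  | cons e ds ih =>
      intro hds n
      have hrest : ∀ x ∈ ds, x ≠ [] := fun x hx => hds x (by simp [hx])
      have hm' : 0 < spaceSize ds := spaceSize_pos ds hrest
      simp only [List.cons_append, PickNthElementFromSpace_alt, spaceSize_snoc]
      rw [ih hrest]
      congr 2
      · rw [floordiv_floordiv n (d.length : Int) (spaceSize ds) hL hm', mul_comm]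
      · rw [mod_mul_div n (d.length : Int) (spaceSize ds) hL hm']
      · rw [mod_mul_mod n (d.length : Int) (spaceSize ds) hL hm']

lemma main_equiv (dims : List (List Int)) :
    (∀ d ∈ dims, d ≠ []) → ∀ n : Int,
      PickNthElementFromSpace dims n = PickNthElementFromSpace_alt dims n := by
  induction dims using List.reverseRecOn with
  | nil => intro _ n; rfl
  | append_singleton ds d ih =>
      intro hne n
      have hd : d ≠ [] := hne d (by simp)
      have hds : ∀ e ∈ ds, e ≠ [] := fun e he => hne e (by simp [he])
      have hL : 0 < (d.length : Int) := by
        have h2 : d.length ≠ 0 := by simpa [List.length_eq_zero_iff] using hd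
        omega
      rw [A_snoc, B_snoc d hd ds hds n, sub_mod_div n _ hL, ih hds]

-- ===== VERDICT (by name: the statement is the Claim_ definition above) =====
theorem PickNthElementFromSpace_spec : Claim_equal_PickNthElementFromSpace := by
  intro dims n _ hpre
  exact main_equiv dims hpre n
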